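-- pv_equiv track=rewrite | github.com/Fondamenti18/fondamenti-di-programmazione | students/1823149/homework04/program01.py | cancella
-- ===== SOURCE A (Python) =====
-- def cancella(x,diz):
--     ret=diz
--     if x in ret.keys():
--         lista=ret.pop(x)
--         for i in lista:
--             ret=cancella(i,ret)
--     cancella_foglia(x,ret)
--     return ret
--
-- def cancella_foglia (x,diz):
--     for i in diz.keys():
--         lista=diz[i]
--         if x in lista:
--             lista.remove(x)
--             return
--     return
-- ===== SOURCE B (Python) =====
-- # Iterative post-order DFS with an explicit stack instead of recursion; same dict mutated in place.
-- def cancella(x, diz):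
--     stack = [(x, False)]
--     while stack:
--         node, done = stack.pop()
--         if done:
--             _remove_first(node, diz)
--         elif node in diz:
--             lista = diz.pop(node)
--             stack.append((node, True))
--             for i in reversed(lista):
--                 stack.append((i, False))
--         else:
--             _remove_first(node, diz)
--     return diz
--
-- def _remove_first(x, diz):
--     for lista in diz.values():
--         if x in lista:
--             lista.remove(x)
--             return
-- ===== Notes on version B (the rewrite author's own statement) =====
-- stated objective: alternative
-- what changed: Replaces the recursive deletion with an iterative post-order DFS over an explicit stack of (node, processed) entries, pushing neighbors in reverse so the first-match leaf removals happen in the identical order.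
import Mathlib
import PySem

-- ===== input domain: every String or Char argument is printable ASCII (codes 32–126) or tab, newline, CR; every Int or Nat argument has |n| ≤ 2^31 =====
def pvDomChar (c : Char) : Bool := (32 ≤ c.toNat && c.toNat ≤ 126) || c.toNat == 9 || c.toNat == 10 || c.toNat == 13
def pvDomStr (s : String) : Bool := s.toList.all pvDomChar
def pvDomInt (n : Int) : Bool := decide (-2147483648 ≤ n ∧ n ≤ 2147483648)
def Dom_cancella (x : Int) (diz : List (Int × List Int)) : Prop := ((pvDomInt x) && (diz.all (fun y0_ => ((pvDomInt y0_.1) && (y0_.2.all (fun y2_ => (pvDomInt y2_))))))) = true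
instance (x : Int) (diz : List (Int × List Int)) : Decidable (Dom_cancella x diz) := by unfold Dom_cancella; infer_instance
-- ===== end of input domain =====

-- B replaces the recursion by an iterative post-order DFS over an explicit stack; equivalence is about the returned value (the Python A mutates diz in place, and B performs the same mutations).

-- ===== PORT A =====
-- lista.remove(x) : remove first occurrence
def removeA : Int → List Int → List Int
  | _, [] => []
  | x, a :: r => if a == x then r else a :: removeA x r

-- cancella_foglia: scan the dict in order, remove x from the first list containing it
def fogliaA : Int → List (Int × List Int) → List (Int × List Int)
  | _, [] => []
  | x, (k, l) :: rest => if l.contains x then (k, removeA x l) :: rest else (k, l) :: fogliaA x rest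

-- x in diz.keys()
def lookupA : Int → List (Int × List Int) → Option (List Int)
  | _, [] => none
  | x, (k, l) :: rest => if k == x then some l else lookupA x rest

-- the key-removal part of diz.pop(x)
def eraseA : Int → List (Int × List Int) → List (Int × List Int)
  | _, [] => []
  | x, (k, l) :: rest => if k == x then rest else (k, l) :: eraseA x rest

-- fuel only makes the recursion total; diz.length + 1 always suffices (each level pops one key)
def cancellaFuel : Nat → Int → List (Int × List Int) → List (Int × List Int)
  | 0, _, d => d
  | n + 1, x, d =>
    match lookupA x d with
    | some lista => fogliaA x (lista.foldl (fun ret i => cancellaFuel n i ret) (eraseA x d))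
    | none => fogliaA x d

def cancella (x : Int) (diz : List (Int × List Int)) : List (Int × List Int) :=
  cancellaFuel (diz.length + 1) x diz

-- ===== PORT B =====
-- _remove_first: scan diz.values() in order, lista.remove(x) from the first list containing x
def removeFirstB : Int → List (Int × List Int) → List (Int × List Int)
  | _, [] => []
  | x, (k, lista) :: rest =>
    if lista.contains x then (k, (PySem.List.remove? lista x).getD lista) :: rest
    else (k, lista) :: removeFirstB x rest

-- 'node in diz' + 'diz.pop(node)' combined: the popped value and the remaining dict
def popB : Int → List (Int × List Int) → Option (List Int × List (Int × List Int))
  | _, [] => none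
  | x, (k, l) :: rest =>
    if k == x then some (l, rest)
    else (popB x rest).map (fun r => (r.1, (k, l) :: r.2))

-- fuel is a totality artifact for the while loop: each iteration strictly decreases stack size + dict weight
def pvWeightB (d : List (Int × List Int)) : Nat := (d.map (fun p => 1 + p.2.length)).sum

-- the while-stack loop; stack head = top of Python's stack (last pushed)
def loopB : Nat → List (Int × Bool) → List (Int × List Int) → List (Int × List Int)
  | 0, _, d => d
  | _ + 1, [], d => d
  | f + 1, (node, done) :: st, d =>
    if done then loopB f st (removeFirstB node d)
    else
      match popB node d with
      | some (lista, d') => loopB f (lista.map (fun i => (i, false)) ++ (node, true) :: st) d'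
      | none => loopB f st (removeFirstB node d)

def cancella_alt (x : Int) (diz : List (Int × List Int)) : List (Int × List Int) :=
  loopB (2 + pvWeightB diz) [(x, false)] diz

-- ===== PRECONDITION & SPEC =====
def Spec_cancella (x : Int) (diz : List (Int × List Int)) (out : List (Int × List Int)) : Prop := out = cancella_alt x diz
instance (x : Int) (diz : List (Int × List Int)) (out : List (Int × List Int)) : Decidable (Spec_cancella x diz out) := by unfold Spec_cancella; infer_instance

-- ===== CLAIM (what is proved, stated in full; the proofs are below) =====
def Claim_equal_cancella : Prop := ∀ (x : Int) (diz : List (Int × List Int)), Dom_cancella x diz → Spec_cancella x diz (cancella x diz)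

-- ===== LEMMAS AND PROOFS =====

theorem removeA_eq_erase (x : Int) (l : List Int) : removeA x l = l.erase x := by
  induction l with
  | nil => rfl
  | cons a r ih => by_cases h : a = x <;> simp [removeA, h, ih]

theorem removeFirstB_eq_fogliaA (x : Int) (d : List (Int × List Int)) :
    removeFirstB x d = fogliaA x d := by
  induction d with
  | nil => rfl
  | cons p rest ih =>
    obtain ⟨k, l⟩ := p
    by_cases h : x ∈ l
    · simp [removeFirstB, fogliaA, h, PySem.List.remove?_eq_some_erase l x h, removeA_eq_erase]
    · simp [removeFirstB, fogliaA, h, ih]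

theorem popB_eq (x : Int) (d : List (Int × List Int)) :
    popB x d = (lookupA x d).map (fun l => (l, eraseA x d)) := by
  induction d with
  | nil => rfl
  | cons p rest ih =>
    obtain ⟨k, l⟩ := p
    by_cases h : k = x
    · simp [popB, lookupA, eraseA, h]
    · simp [popB, lookupA, eraseA, h, ih]
      cases lookupA x rest <;> simp

theorem length_removeA_le (x : Int) (l : List Int) : (removeA x l).length ≤ l.length := by
  induction l with
  | nil => simp [removeA]
  | cons a r ih => by_cases h : a = x <;> simp [removeA, h] <;> omega

theorem length_fogliaA (x : Int) (d : List (Int × List Int)) :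
    (fogliaA x d).length = d.length := by
  induction d with
  | nil => rfl
  | cons p rest ih =>
    obtain ⟨k, l⟩ := p
    by_cases h : x ∈ l <;> simp [fogliaA, h, ih]

theorem pvWeightB_cons (k : Int) (l : List Int) (rest : List (Int × List Int)) :
    pvWeightB ((k, l) :: rest) = 1 + l.length + pvWeightB rest := by
  simp [pvWeightB]

theorem weight_fogliaA_le (x : Int) (d : List (Int × List Int)) :
    pvWeightB (fogliaA x d) ≤ pvWeightB d := by
  induction d with
  | nil => simp [fogliaA]
  | cons p rest ih =>
    obtain ⟨k, l⟩ := p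
    by_cases h : x ∈ l
    · have := length_removeA_le x l
      simp [fogliaA, h, pvWeightB_cons]
      omega
    · simp [fogliaA, h, pvWeightB_cons]
      omega

theorem eraseA_of_lookupA_some (x : Int) (d : List (Int × List Int)) (l : List Int)
    (h : lookupA x d = some l) :
    (eraseA x d).length + 1 = d.length ∧ pvWeightB (eraseA x d) + 1 + l.length = pvWeightB d := by
  induction d with
  | nil => simp [lookupA] at h
  | cons p rest ih =>
    obtain ⟨k, v⟩ := p
    by_cases hk : k = x
    · simp [lookupA, hk] at h
      subst h
      simp [eraseA, hk, pvWeightB_cons]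
      omega
    · simp [lookupA, hk] at h
      obtain ⟨h1, h2⟩ := ih h
      simp [eraseA, hk, pvWeightB_cons]
      omega

theorem length_cancellaFuel_le (n : Nat) :
    ∀ (x : Int) (d : List (Int × List Int)), (cancellaFuel n x d).length ≤ d.length := by
  induction n with
  | zero => intro x d; simp [cancellaFuel]
  | succ n ih =>
    intro x d
    rw [cancellaFuel]
    cases hl : lookupA x d with
    | none => simp [length_fogliaA]
    | some lista =>
      have herase := (eraseA_of_lookupA_some x d lista hl).1
      have hfold : ∀ (l : List Int) (acc : List (Int × List Int)),
          (l.foldl (fun ret i => cancellaFuel n i ret) acc).length ≤ acc.length := by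
        intro l
        induction l with
        | nil => intro acc; simp
        | cons a r ihr =>
          intro acc
          simp only [List.foldl_cons]
          exact le_trans (ihr _) (ih a acc)
      simp only [length_fogliaA]
      have := hfold lista (eraseA x d)
      omega

theorem cancellaFuel_irrel (n : Nat) :
    ∀ (m : Nat) (x : Int) (d : List (Int × List Int)), d.length < n → d.length < m →
      cancellaFuel n x d = cancellaFuel m x d := by
  induction n with
  | zero => intro m x d h; omega
  | succ n ih =>
    intro m x d hn hm
    cases m with
    | zero => omega
    | succ m =>
      cases hl : lookupA x d with
      | none => simp only [cancellaFuel, hl]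
      | some lista =>
        have herase := (eraseA_of_lookupA_some x d lista hl).1
        simp only [cancellaFuel, hl]
        have hfold : ∀ (l : List Int) (acc : List (Int × List Int)), acc.length < n → acc.length < m →
            l.foldl (fun ret i => cancellaFuel n i ret) acc
              = l.foldl (fun ret i => cancellaFuel m i ret) acc := by
          intro l
          induction l with
          | nil => intro acc _ _; rfl
          | cons a r ihr =>
            intro acc ha hb
            simp only [List.foldl_cons]
            rw [ih m a acc ha hb]
            exact ihr _ (lt_of_le_of_lt (length_cancellaFuel_le m a acc) ha)
              (lt_of_le_of_lt (length_cancellaFuel_le m a acc) hb)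
        rw [hfold lista (eraseA x d) (by omega) (by omega)]

-- cancella as one step: unfolds the top fuel layer with self-sufficient fuel
theorem cancella_none (x : Int) (d : List (Int × List Int)) (h : lookupA x d = none) :
    cancella x d = fogliaA x d := by
  rw [cancella, cancellaFuel, h]

theorem foldl_fuel_eq_cancella (n : Nat) (l : List Int) :
    ∀ (acc : List (Int × List Int)), acc.length < n →
      l.foldl (fun ret i => cancellaFuel n i ret) acc = l.foldl (fun ret i => cancella i ret) acc := by
  induction l with
  | nil => intro acc _; rfl
  | cons a r ih =>
    intro acc ha
    simp only [List.foldl_cons]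
    rw [show cancellaFuel n a acc = cancella a acc from
      cancellaFuel_irrel n (acc.length + 1) a acc ha (by omega)]
    exact ih _ (lt_of_le_of_lt (le_trans (length_cancellaFuel_le (acc.length + 1) a acc) (le_refl _)) ha)

theorem cancella_some (x : Int) (d : List (Int × List Int)) (lista : List Int)
    (h : lookupA x d = some lista) :
    cancella x d = fogliaA x (lista.foldl (fun ret i => cancella i ret) (eraseA x d)) := by
  have herase := (eraseA_of_lookupA_some x d lista h).1
  rw [cancella]
  simp only [cancellaFuel, h]
  rw [foldl_fuel_eq_cancella d.length lista (eraseA x d) (by omega)]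

-- reference run of the stack machine: processes entries left to right, structurally
def runS : List (Int × Bool) → List (Int × List Int) → List (Int × List Int)
  | [], d => d
  | (x, true) :: st, d => runS st (fogliaA x d)
  | (x, false) :: st, d => runS st (cancella x d)

theorem runS_map_false (l : List Int) :
    ∀ (st : List (Int × Bool)) (d : List (Int × List Int)),
      runS (l.map (fun i => (i, false)) ++ st) d = runS st (l.foldl (fun ret i => cancella i ret) d) := by
  induction l with
  | nil => intro st d; rfl
  | cons a r ih => intro st d; simp only [List.map_cons, List.cons_append, runS, List.foldl_cons, ih]

theorem loopB_eq_runS (f : Nat) :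
    ∀ (st : List (Int × Bool)) (d : List (Int × List Int)),
      st.length + pvWeightB d ≤ f → loopB f st d = runS st d := by
  induction f with
  | zero =>
    intro st d h
    have : st = [] := by cases st <;> simp at h ⊢
    subst this; rfl
  | succ f ih =>
    intro st d h
    cases st with
    | nil => rfl
    | cons p st =>
      obtain ⟨node, done⟩ := p
      cases done with
      | true =>
        simp only [loopB, runS, if_true, removeFirstB_eq_fogliaA]
        exact ih st _ (by have := weight_fogliaA_le node d; simp at h; omega)
      | false =>
        simp only [loopB, runS, if_false, Bool.false_eq_true, popB_eq]
        cases hl : lookupA node d with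
        | none =>
          simp only [Option.map_none]
          rw [removeFirstB_eq_fogliaA, cancella_none node d hl]
          exact ih st _ (by have := weight_fogliaA_le node d; simp at h; omega)
        | some lista =>
          simp only [Option.map_some]
          have herase := (eraseA_of_lookupA_some node d lista hl).2
          rw [ih _ _ (by simp at h ⊢; omega)]
          rw [runS_map_false, cancella_some node d lista hl]
          rfl

-- ===== VERDICT (by name: the statement is the Claim_ definition above) =====
theorem cancella_spec : Claim_equal_cancella := by
  intro x diz _
  unfold Spec_cancella cancella_alt
  rw [loopB_eq_runS (2 + pvWeightB diz) [(x, false)] diz (by simp)]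
  rfl
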